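-- pv_equiv track=rewrite | github.com/HelloMeFriend/leetCode-solutions | medium/1090_Largest Values From Labels.py | largestValsFromLabels
-- ===== SOURCE A (Python) =====
-- def largestValsFromLabels(values, labels, numWanted, useLimit):
--     """
--     :type values: List[int]
--     :type labels: List[int]
--     :type numWanted: int
--     :type useLimit: int
--     :rtype: int
--     """
--
--     items = sorted(zip(values, labels), reverse=True)
--     s = 0
--     count = 0
--     label_count = {}
--
--     for value, label in items:
--         if count == numWanted:
--             break
--         if label_count.get(label, 0) < useLimit:
--             s += value
--             label_count[label] = label_count.get(label, 0) + 1
--             count +=1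
--
--     return s
-- ===== SOURCE B (Python) =====
-- def largestValsFromLabels(values, labels, numWanted, useLimit):
--     buckets = {}
--     for v, l in zip(values, labels):
--         buckets.setdefault(l, []).append(v)
--     pool = []
--     for vs in buckets.values():
--         pool += sorted(vs, reverse=True)[:useLimit]
--     pool.sort(reverse=True)
--     return sum(pool[:numWanted])
-- ===== Notes on version B (the rewrite author's own statement) =====
-- stated objective: alternative
-- what changed: Replaces A's single sweep over the globally sorted (value,label) pairs with a running per-label counter dict and an early break by two explicit phases: group values by label into buckets, pool each bucket's top-useLimit values, then sort the pool descending and sum its first numWanted entries.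
-- outside the precondition, e.g. on largestValsFromLabels([4, 2], [1, 1], -1, 1): A returns 4, B returns 0; on largestValsFromLabels([4, 2], [1, 1], 2, -1): A returns 0, B returns 4
import Mathlib
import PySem

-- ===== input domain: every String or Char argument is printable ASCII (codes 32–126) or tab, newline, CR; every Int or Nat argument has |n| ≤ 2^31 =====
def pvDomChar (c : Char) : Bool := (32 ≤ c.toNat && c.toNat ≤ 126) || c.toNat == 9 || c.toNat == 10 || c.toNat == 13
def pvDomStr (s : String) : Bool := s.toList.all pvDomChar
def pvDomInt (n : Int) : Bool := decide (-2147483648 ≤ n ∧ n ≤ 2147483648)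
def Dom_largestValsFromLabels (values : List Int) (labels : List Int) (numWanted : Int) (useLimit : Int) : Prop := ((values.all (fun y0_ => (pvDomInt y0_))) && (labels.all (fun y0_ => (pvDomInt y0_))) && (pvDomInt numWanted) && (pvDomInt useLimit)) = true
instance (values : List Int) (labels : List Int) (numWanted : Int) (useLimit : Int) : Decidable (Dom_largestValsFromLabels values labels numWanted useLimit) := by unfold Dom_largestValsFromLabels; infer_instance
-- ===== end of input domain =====

-- B replaces A's single sweep over the sorted pairs with its running per-label counter and early break
-- by two explicit phases (per-label bucket truncation, then one global sort-and-take); alternative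
-- decomposition, same asymptotic cost.

-- ===== PORT A =====
-- the 'for … break' loop of A: structural recursion, break = early return of s
def pvLoopA (numWanted useLimit : Int) : List (Int × Int) → Int → Int → PySem.Dict Int Int → Int
  | [], s, _, _ => s
  | (v, l) :: rest, s, count, labelCount =>
    if count = numWanted then s
    else if labelCount.getD l 0 < useLimit then
      pvLoopA numWanted useLimit rest (s + v) (count + 1) (labelCount.insert l (labelCount.getD l 0 + 1))
    else
      pvLoopA numWanted useLimit rest s count labelCount

def largestValsFromLabels (values : List Int) (labels : List Int) (numWanted : Int) (useLimit : Int) : Int :=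
  pvLoopA numWanted useLimit (PySem.List.sorted2 (values.zip labels) Prod.fst Prod.snd true) 0 0 PySem.Dict.empty

-- ===== PORT B =====
def largestValsFromLabels_alt (values : List Int) (labels : List Int) (numWanted : Int) (useLimit : Int) : Int :=
  let buckets := (values.zip labels).foldl
    (fun (d : PySem.Dict Int (List Int)) p => d.modify p.2 [] (fun vs => vs ++ [p.1])) PySem.Dict.empty
  let pool := buckets.items.foldl
    (fun pool p => pool ++ PySem.List.slice (PySem.List.sorted p.2 (fun x => x) true) none (some useLimit)) []
  (PySem.List.slice (PySem.List.sorted pool (fun x => x) true) none (some numWanted)).sum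

-- ===== PRECONDITION & SPEC =====
-- Pre_ excludes negative numWanted or useLimit: there A's never-breaking loop (resp. never-true cap)
-- and B's Python negative-slice semantics are both accidental conventions on inputs outside the
-- problem's natural domain, and no caller would specify either.
def Pre_largestValsFromLabels (values : List Int) (labels : List Int) (numWanted : Int) (useLimit : Int) : Prop :=
  0 ≤ numWanted ∧ 0 ≤ useLimit
instance (values : List Int) (labels : List Int) (numWanted : Int) (useLimit : Int) : Decidable (Pre_largestValsFromLabels values labels numWanted useLimit) := by unfold Pre_largestValsFromLabels; infer_instance

def pvWitness_largestValsFromLabels : List Int × List Int × Int × Int := ([5, 4, 3, 2], [1, 1, 2, 3], 3, 1)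

def Spec_largestValsFromLabels (values : List Int) (labels : List Int) (numWanted : Int) (useLimit : Int) (out : Int) : Prop := out = largestValsFromLabels_alt values labels numWanted useLimit
instance (values : List Int) (labels : List Int) (numWanted : Int) (useLimit : Int) (out : Int) : Decidable (Spec_largestValsFromLabels values labels numWanted useLimit out) := by unfold Spec_largestValsFromLabels; infer_instance

-- ===== CLAIM (what is proved, stated in full; the proofs are below) =====
def Claim_equal_largestValsFromLabels : Prop := ∀ (values : List Int) (labels : List Int) (numWanted : Int) (useLimit : Int), Dom_largestValsFromLabels values labels numWanted useLimit → Pre_largestValsFromLabels values labels numWanted useLimit → Spec_largestValsFromLabels values labels numWanted useLimit (largestValsFromLabels values labels numWanted useLimit)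

-- ===== LEMMAS AND PROOFS =====

-- the (non-strict) reverse lexicographic order A's sort produces
def pvLexGe (a b : Int × Int) : Prop := b.1 < a.1 ∨ (b.1 = a.1 ∧ b.2 ≤ a.2)

-- A's per-label cap as a pure filter (no count/break): keeps a pair while its label is under the limit
def pvFilt (u : Int) : List (Int × Int) → PySem.Dict Int Int → List (Int × Int)
  | [], _ => []
  | (v, l) :: rest, d =>
    if d.getD l 0 < u then (v, l) :: pvFilt u rest (d.insert l (d.getD l 0 + 1))
    else pvFilt u rest d

lemma pv_insertBy_pairwise {α : Type} (before : α → α → Bool) (R : α → α → Prop)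
    (htrans : ∀ a b c, R a b → R b c → R a c)
    (hfalse : ∀ a b, before a b = false → R b a)
    (hasym : ∀ a b, before a b = true → before b a = false)
    (x : α) : ∀ ys : List α, ys.Pairwise R → (PySem.List.insertBy before x ys).Pairwise R := by
  intro ys
  induction ys with
  | nil => intro _; simp [PySem.List.insertBy]
  | cons y ys ih =>
    intro h
    rw [List.pairwise_cons] at h
    obtain ⟨hy, hys⟩ := h
    by_cases hb : before x y = true
    · simp only [PySem.List.insertBy, hb, if_true]
      have hxy : R x y := hfalse y x (hasym x y hb)
      refine List.pairwise_cons.mpr ⟨?_, List.pairwise_cons.mpr ⟨hy, hys⟩⟩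
      intro z hz
      rcases List.mem_cons.mp hz with hz | hz
      · exact hz ▸ hxy
      · exact htrans x y z hxy (hy z hz)
    · simp only [PySem.List.insertBy, hb]
      refine List.pairwise_cons.mpr ⟨?_, ih hys⟩
      intro z hz
      rcases (PySem.List.mem_insertBy before x z ys).mp hz with hz | hz
      · exact hz ▸ hfalse x y (by simpa using hb)
      · exact hy z hz

lemma pv_foldl_insertBy_pairwise {α : Type} (before : α → α → Bool) (R : α → α → Prop)
    (htrans : ∀ a b c, R a b → R b c → R a c)
    (hfalse : ∀ a b, before a b = false → R b a)
    (hasym : ∀ a b, before a b = true → before b a = false)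
    (xs : List α) : ∀ acc : List α, acc.Pairwise R →
      (xs.foldl (fun acc x => PySem.List.insertBy before x acc) acc).Pairwise R := by
  induction xs with
  | nil => intro acc h; simpa using h
  | cons x xs ih =>
    intro acc h
    simp only [List.foldl_cons]
    exact ih _ (pv_insertBy_pairwise before R htrans hfalse hasym x acc h)

lemma pv_sorted2_pairwise (xs : List (Int × Int)) :
    (PySem.List.sorted2 xs Prod.fst Prod.snd true).Pairwise pvLexGe := by
  have hdef : PySem.List.sorted2 xs Prod.fst Prod.snd true =
      xs.foldl (fun acc x => PySem.List.insertBy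
        (fun a b => decide (b.1 < a.1) || (!decide (a.1 < b.1) && decide (b.2 < a.2))) x acc) [] := rfl
  rw [hdef]
  apply pv_foldl_insertBy_pairwise _ pvLexGe
  · intro a b c hab hbc
    unfold pvLexGe at *
    rcases hab with h1 | ⟨h1, h2⟩ <;> rcases hbc with h3 | ⟨h3, h4⟩ <;>
      first
      | (left; omega)
      | (right; constructor <;> omega)
  · intro a b h
    simp only [Bool.or_eq_false_iff, Bool.and_eq_false_iff, decide_eq_false_iff_not,
      Bool.not_eq_false', decide_eq_true_eq] at h
    unfold pvLexGe
    omega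
  · intro a b h
    simp only [Bool.or_eq_true, Bool.and_eq_true, decide_eq_true_eq, Bool.not_eq_true',
      decide_eq_false_iff_not] at h
    simp only [Bool.or_eq_false_iff, Bool.and_eq_false_iff, decide_eq_false_iff_not,
      Bool.not_eq_false', decide_eq_true_eq]
    omega
  · exact List.Pairwise.nil

lemma pv_filt_sublist (u : Int) : ∀ (xs : List (Int × Int)) (d : PySem.Dict Int Int),
    (pvFilt u xs d).Sublist xs := by
  intro xs
  induction xs with
  | nil => intro d; simp [pvFilt]
  | cons p rest ih =>
    intro d
    obtain ⟨v, l⟩ := p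
    simp only [pvFilt]
    split_ifs with h
    · exact (ih _).cons₂ _
    · exact (ih _).cons _

lemma pv_loopA_eq (n u : Int) : ∀ (xs : List (Int × Int)) (s c : Int) (d : PySem.Dict Int Int),
    c ≤ n →
    pvLoopA n u xs s c d = s + (((pvFilt u xs d).map Prod.fst).take (n - c).toNat).sum := by
  intro xs
  induction xs with
  | nil => intro s c d _; simp [pvLoopA, pvFilt]
  | cons p rest ih =>
    intro s c d hc
    obtain ⟨v, l⟩ := p
    by_cases hcn : c = n
    · subst hcn
      simp [pvLoopA]
    · have hlt : c < n := lt_of_le_of_ne hc hcn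
      have htn : (n - c).toNat = (n - (c + 1)).toNat + 1 := by omega
      simp only [pvLoopA, if_neg hcn]
      split_ifs with h
      · rw [ih (s + v) (c + 1) _ (by omega)]
        simp only [pvFilt, if_pos h, List.map_cons, htn, List.take_succ_cons, List.sum_cons]
        ring
      · rw [ih s c d hc]
        simp only [pvFilt, if_neg h]

lemma pv_filt_multiset (u : Int) (L : List Int) (hL : L.Nodup) :
    ∀ (xs : List (Int × Int)) (d : PySem.Dict Int Int), (∀ p ∈ xs, p.2 ∈ L) →
    (↑(pvFilt u xs d) : Multiset (Int × Int)) =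
      (L.map (fun l => (↑((xs.filter (fun p => p.2 == l)).take (u - d.getD l 0).toNat) : Multiset (Int × Int)))).sum := by
  intro xs
  induction xs with
  | nil =>
    intro d _
    simp [pvFilt]
  | cons p rest ih =>
    intro d hmem
    obtain ⟨v, l⟩ := p
    have hl : l ∈ L := hmem (v, l) (by simp)
    have hrest : ∀ q ∈ rest, q.2 ∈ L := fun q hq => hmem q (by simp [hq])
    have hsplit : ∀ f : Int → Multiset (Int × Int),
        (L.map f).sum = f l + ((L.erase l).map f).sum := by
      intro f
      have hp : L.Perm (l :: L.erase l) := List.perm_cons_erase hl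
      rw [(hp.map f).sum_eq]
      simp
    have hne : ∀ l' ∈ L.erase l, l' ≠ l := by
      intro l' hl'
      exact ((List.Nodup.mem_erase_iff hL).mp hl').1
    simp only [pvFilt]
    split_ifs with h
    · rw [← Multiset.cons_coe, ih _ hrest, hsplit, hsplit]
      have hgl :
          (↑((((v, l) :: rest).filter (fun p => p.2 == l)).take (u - d.getD l 0).toNat) : Multiset (Int × Int)) =
            (v, l) ::ₘ (↑((rest.filter (fun p => p.2 == l)).take (u - (d.insert l (d.getD l 0 + 1)).getD l 0).toNat) : Multiset (Int × Int)) := by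
        have hfc : ((v, l) :: rest).filter (fun p => p.2 == l) =
            (v, l) :: rest.filter (fun p => p.2 == l) := by simp
        have hd' : (d.insert l (d.getD l 0 + 1)).getD l 0 = d.getD l 0 + 1 :=
          PySem.Dict.getD_insert_self d l _ 0
        have htn : (u - d.getD l 0).toNat = (u - (d.getD l 0 + 1)).toNat + 1 := by omega
        rw [hfc, hd', htn, List.take_succ_cons, Multiset.cons_coe]
      rw [hgl]
      have hoth : ((L.erase l).map (fun l' =>
            (↑((((v, l) :: rest).filter (fun p => p.2 == l')).take (u - d.getD l' 0).toNat) : Multiset (Int × Int)))) =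
          ((L.erase l).map (fun l' =>
            (↑((rest.filter (fun p => p.2 == l')).take (u - (d.insert l (d.getD l 0 + 1)).getD l' 0).toNat) : Multiset (Int × Int)))) := by
        apply List.map_congr_left
        intro l' hl'
        have hne' := hne l' hl'
        have hfc : ((v, l) :: rest).filter (fun p => p.2 == l') = rest.filter (fun p => p.2 == l') := by
          simp [(by simpa using hne'.symm : (l == l') = false)]
        have hd' : (d.insert l (d.getD l 0 + 1)).getD l' 0 = d.getD l' 0 :=
          PySem.Dict.getD_insert_of_ne d _ 0 hne'
        rw [hfc, hd']
      rw [hoth, Multiset.cons_add]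
    · rw [ih _ hrest]
      congr 1
      apply List.map_congr_left
      intro l' hl'
      by_cases hll : l' = l
      · subst hll
        have htn : (u - d.getD l' 0).toNat = 0 := by omega
        simp [htn]
      · have hfc : ((v, l) :: rest).filter (fun p => p.2 == l') = rest.filter (fun p => p.2 == l') := by
          simp [(by simpa using (Ne.symm hll) : (l == l') = false)]
        rw [hfc]

lemma pv_coe_flatMap {γ α : Type} (g : γ → List α) (L : List γ) :
    (↑(L.flatMap g) : Multiset α) = (L.map (fun c => (↑(g c) : Multiset α))).sum := by
  induction L with
  | nil => simp
  | cons c L ih => simp [List.flatMap_cons, ← Multiset.coe_add, ih]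

lemma pv_map_msum {γ α β : Type} (f : α → β) (L : List γ) (g : γ → List α) :
    Multiset.map f ((L.map (fun c => (↑(g c) : Multiset α))).sum) =
      (L.map (fun c => (↑((g c).map f) : Multiset β))).sum := by
  induction L with
  | nil => simp
  | cons c L ih => simp [Multiset.map_add, ih]

lemma pv_buckets_getD (pairs : List (Int × Int)) (l : Int) :
    ((pairs.foldl (fun (d : PySem.Dict Int (List Int)) p => d.modify p.2 [] (fun vs => vs ++ [p.1]))
        PySem.Dict.empty).getD l []) = (pairs.filter (fun p => p.2 == l)).map Prod.fst := by
  have h1 : pairs.foldl (fun (d : PySem.Dict Int (List Int)) p => d.modify p.2 [] (fun vs => vs ++ [p.1])) PySem.Dict.empty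
      = (pairs.map Prod.swap).foldl (fun (d : PySem.Dict Int (List Int)) q => d.modify q.1 [] (fun vs => vs ++ [q.2])) PySem.Dict.empty := by
    rw [List.foldl_map]; rfl
  rw [h1, PySem.Dict.getD_foldl_modify_append]
  rw [List.filter_map]
  simp [Function.comp_def, List.map_map]

lemma pv_buckets_keys (pairs : List (Int × Int)) :
    ((pairs.foldl (fun (d : PySem.Dict Int (List Int)) p => d.modify p.2 [] (fun vs => vs ++ [p.1]))
        PySem.Dict.empty).keys) = PySem.Set.ofList (pairs.map Prod.snd) := by
  rw [PySem.Dict.keys_foldl_modify_key pairs Prod.snd [] (fun _ p vs => vs ++ [p.1]) PySem.Dict.empty]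
  simp [PySem.Dict.keys_empty, PySem.Set.update_nil_left]

lemma pv_perLabel (pairs : List (Int × Int)) (l : Int) :
    ((PySem.List.sorted2 pairs Prod.fst Prod.snd true).filter (fun p => p.2 == l)).map Prod.fst
      = PySem.List.sorted ((pairs.filter (fun p => p.2 == l)).map Prod.fst) (fun x => x) true := by
  apply PySem.List.eq_of_perm_of_pairwise_le_of_injective (key := fun x : Int => -x) neg_injective
  · have h1 : (PySem.List.sorted2 pairs Prod.fst Prod.snd true).Perm pairs :=
      PySem.List.sorted2_perm pairs Prod.fst Prod.snd true
    have h2 := (h1.filter (fun p => p.2 == l)).map Prod.fst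
    have h3 : (PySem.List.sorted ((pairs.filter (fun p => p.2 == l)).map Prod.fst) (fun x => x) true).Perm
        ((pairs.filter (fun p => p.2 == l)).map Prod.fst) :=
      PySem.List.sorted_perm _ _ _
    exact h2.trans h3.symm
  · have hp := pv_sorted2_pairwise pairs
    have hs : ((PySem.List.sorted2 pairs Prod.fst Prod.snd true).filter (fun p => p.2 == l)).Pairwise pvLexGe :=
      hp.sublist List.filter_sublist
    rw [List.pairwise_map]
    refine hs.imp ?_
    intro a b hab
    rcases hab with h | ⟨h, _⟩ <;> simp <;> omega
  · have := PySem.List.sorted_pairwise_rev ((pairs.filter (fun p => p.2 == l)).map Prod.fst) (fun x => x)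
    refine this.imp ?_
    intro a b hab
    simpa using hab

-- ===== VERDICT (by name: the statement is the Claim_ definition above) =====
theorem largestValsFromLabels_spec : Claim_equal_largestValsFromLabels := by
  intro values labels n u _hDom hPre
  obtain ⟨hn, hu⟩ := hPre
  unfold Spec_largestValsFromLabels
  simp only [largestValsFromLabels, largestValsFromLabels_alt]
  set pairs := values.zip labels with hpairs
  set P := PySem.List.sorted2 pairs Prod.fst Prod.snd true with hP
  set L := PySem.Set.ofList (pairs.map Prod.snd) with hLdef
  set bucketsD := pairs.foldl
    (fun (d : PySem.Dict Int (List Int)) p => d.modify p.2 [] (fun vs => vs ++ [p.1])) PySem.Dict.empty with hB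
  have hLnodup : L.Nodup := PySem.Set.nodup_ofList _
  have hkeys : bucketsD.keys = L := pv_buckets_keys pairs
  have hitems : bucketsD.items = L.map (fun l => (l, (pairs.filter (fun p => p.2 == l)).map Prod.fst)) := by
    rw [PySem.Dict.items_eq_map_keys bucketsD (hkeys ▸ hLnodup) [], hkeys]
    apply List.map_congr_left
    intro l _
    rw [pv_buckets_getD]
  -- the pool as a flatMap over the distinct labels
  have hpool : bucketsD.items.foldl
      (fun pool p => pool ++ PySem.List.slice (PySem.List.sorted p.2 (fun x => x) true) none (some u)) []
      = L.flatMap (fun l =>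
          (PySem.List.sorted ((pairs.filter (fun p => p.2 == l)).map Prod.fst) (fun x => x) true).take u.toNat) := by
    rw [PySem.List.foldl_append_eq_flatMap, List.nil_append, hitems, List.flatMap_map]
    apply List.flatMap_congr
    intro l _
    exact PySem.List.slice_to _ hu
  rw [hpool, PySem.List.slice_to _ hn]
  -- every label occurring in P is in L
  have hmemP : ∀ p ∈ P, p.2 ∈ L := by
    intro p hp
    rw [hLdef, PySem.Set.mem_ofList]
    have hpp : p ∈ pairs := (PySem.List.sorted2_perm pairs Prod.fst Prod.snd true).mem_iff.mp hp
    exact List.mem_map_of_mem hpp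
  -- the pool and the values kept by A's cap carry the same multiset
  have hVm : (↑((pvFilt u P PySem.Dict.empty).map Prod.fst) : Multiset Int)
      = ↑(L.flatMap (fun l =>
          (PySem.List.sorted ((pairs.filter (fun p => p.2 == l)).map Prod.fst) (fun x => x) true).take u.toNat)) := by
    rw [pv_coe_flatMap, ← Multiset.map_coe,
      pv_filt_multiset u L hLnodup P PySem.Dict.empty hmemP]
    simp only [PySem.Dict.getD_empty, sub_zero]
    rw [pv_map_msum]
    congr 1
    apply List.map_congr_left
    intro l _
    rw [List.map_take, pv_perLabel]
  have hVperm : (PySem.List.sorted (L.flatMap (fun l =>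
        (PySem.List.sorted ((pairs.filter (fun p => p.2 == l)).map Prod.fst) (fun x => x) true).take u.toNat))
          (fun x => x) true).Perm ((pvFilt u P PySem.Dict.empty).map Prod.fst) := by
    refine (PySem.List.sorted_perm _ _ _).trans ?_
    exact (Multiset.coe_eq_coe.mp hVm).symm
  have hVeq : PySem.List.sorted (L.flatMap (fun l =>
        (PySem.List.sorted ((pairs.filter (fun p => p.2 == l)).map Prod.fst) (fun x => x) true).take u.toNat))
          (fun x => x) true = (pvFilt u P PySem.Dict.empty).map Prod.fst := by
    apply PySem.List.eq_of_perm_of_pairwise_le_of_injective (key := fun x : Int => -x) neg_injective hVperm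
    · refine (PySem.List.sorted_pairwise_rev _ _).imp ?_
      intro a b hab
      simpa using hab
    · have hs : (pvFilt u P PySem.Dict.empty).Pairwise pvLexGe :=
        (pv_sorted2_pairwise pairs).sublist (pv_filt_sublist u P PySem.Dict.empty)
      rw [List.pairwise_map]
      refine hs.imp ?_
      intro a b hab
      rcases hab with h | ⟨h, _⟩ <;> simp <;> omega
  rw [hVeq, pv_loopA_eq n u P 0 0 PySem.Dict.empty hn]
  simp
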